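-- pv_equiv track=rewrite | github.com/dymp1q/discretemath_project | testalgo.py | maximal_planar_subgraph
-- ===== SOURCE A (Python) =====
-- def is_planar_euler(graph: dict) -> bool:
--     """
--     Перевірка умови m <= 3n - 6.
--     """
--     n = len(graph)
--     edge_count = 0
--     for v in graph:
--         edge_count += len(graph[v])
--     m = edge_count // 2
--
--     if n < 3:
--         return True
--
--     return m <= 3 * n - 6
--
-- def is_maximal_by_euler(graph: dict) -> bool:
--     """
--     Перевірка, що m = 3n - 6.
--     """
--     n = len(graph)
--     edge_count = 0
--     for v in graph:
--         edge_count += len(graph[v])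
--     m = edge_count // 2
--
--     if n < 3:
--         return True
--
--     return m == 3 * n - 6
--
-- def edges_of(graph: dict) -> list[tuple]:
--     """
--     Список ребер (u, v), u < v.
--     """
--     edges = []
--     seen = set()
--
--     for u in graph:
--         for v in graph[u]:
--             if u == v:
--                 continue
--             if u < v:
--                 edge = (u, v)
--             else:
--                 edge = (v, u)
--             if edge not in seen:
--                 seen.add(edge)
--                 edges.append(edge)
--
--     return edges
--
-- def make_empty_copy(original: dict) -> dict:
--     """
--     Копія графа без ребер.
--     """
--     new_graph = {}
--     for v in original:
--         new_graph[v] = set()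
--     return new_graph
--
-- def add_edge(graph: dict, u, v) -> None:
--     if u not in graph:
--         graph[u] = set()
--     if v not in graph:
--         graph[v] = set()
--     graph[u].add(v)
--     graph[v].add(u)
--
-- def remove_edge(graph: dict, u, v) -> None:
--     if u in graph and v in graph[u]:
--         graph[u].remove(v)
--     if v in graph and u in graph[v]:
--         graph[v].remove(u)
--
-- def maximal_planar_subgraph(original: dict) -> dict:
--     """
--     Жадібний пошук максимального планарного підграфа.
--     """
--     planar = make_empty_copy(original)
--     all_edges = edges_of(original)
--     all_edges.sort()
--
--     for (u, v) in all_edges: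
--         if is_maximal_by_euler(planar):
--             break
--
--         add_edge(planar, u, v)
--
--         if not is_planar_euler(planar):
--             remove_edge(planar, u, v)
--
--     return planar
-- ===== SOURCE B (Python) =====
-- def maximal_planar_subgraph(original: dict) -> dict:
--     planar = {v: set() for v in original}
--     edges = sorted({(u, v) if u < v else (v, u)
--                     for u, nbrs in original.items() for v in nbrs if u != v})
--     n, m = len(planar), 0
--     for u, v in edges:
--         if n < 3 or m == 3 * n - 6:
--             break
--         if u not in planar:
--             planar[u] = set()
--             n += 1
--         if v not in planar:
--             planar[v] = set()
--             n += 1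
--         if m + 1 <= 3 * n - 6:
--             planar[u].add(v)
--             planar[v].add(u)
--             m += 1
--     return planar
-- ===== Notes on version B (the rewrite author's own statement) =====
-- stated objective: faster
-- what changed: B sorts the deduplicated edge set once and maintains the vertex count n and edge count m incrementally (adding vertices and, when the Euler bound m+1 <= 3n-6 allows, the edge), instead of A's per-edge full rescans of the graph to recount n and m and its add-then-test-then-remove cycle.
import Mathlib
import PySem

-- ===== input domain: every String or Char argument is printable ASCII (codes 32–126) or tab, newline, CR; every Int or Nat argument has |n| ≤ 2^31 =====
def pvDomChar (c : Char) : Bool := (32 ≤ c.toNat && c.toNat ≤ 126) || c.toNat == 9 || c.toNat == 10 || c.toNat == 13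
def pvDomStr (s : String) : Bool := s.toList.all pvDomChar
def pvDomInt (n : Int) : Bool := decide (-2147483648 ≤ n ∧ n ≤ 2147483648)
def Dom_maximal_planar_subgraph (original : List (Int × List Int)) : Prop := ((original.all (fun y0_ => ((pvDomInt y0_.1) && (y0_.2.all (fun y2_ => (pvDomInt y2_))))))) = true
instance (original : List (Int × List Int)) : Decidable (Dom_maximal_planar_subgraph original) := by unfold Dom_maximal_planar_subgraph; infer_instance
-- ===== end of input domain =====

-- B replaces A's per-edge rescans of the whole graph (vertex and edge counts recomputed for every
-- candidate edge, and edges added then removed again) by incrementally maintained vertex/edge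
-- counters, so each Euler-bound check is O(1); objective: faster.

-- ===== PORT A =====
-- Python's list.sort() on pairs of ints is the lexicographic order; two stable PySem sorts
-- implement exactly that order (helper shared by both ports: both Pythons sort the same pairs).
def pvSortPairs (xs : List (Int × Int)) : List (Int × Int) :=
  PySem.List.sorted (PySem.List.sorted xs (fun e => e.2) false) (fun e => e.1) false

-- is_planar_euler: iterates the dict's keys and looks each value up (graph[v]; every key is
-- present, so getD with a default is exact).
def pvIsPlanarEuler (graph : PySem.Dict Int (PySem.Set Int)) : Bool :=
  let n : Int := (graph.size : Int)
  let edge_count : Int :=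
    graph.keys.foldl (fun acc v => acc + ((graph.getD v PySem.Set.empty).length : Int)) 0
  let m := PySem.Int.floordiv edge_count 2
  if n < 3 then true else decide (m ≤ 3 * n - 6)

def pvIsMaximalByEuler (graph : PySem.Dict Int (PySem.Set Int)) : Bool :=
  let n : Int := (graph.size : Int)
  let edge_count : Int :=
    graph.keys.foldl (fun acc v => acc + ((graph.getD v PySem.Set.empty).length : Int)) 0
  let m := PySem.Int.floordiv edge_count 2
  if n < 3 then true else decide (m = 3 * n - 6)

-- the body of edges_of's inner loop
def pvEdgeStep (u : Int) (st : List (Int × Int) × PySem.Set (Int × Int)) (v : Int) :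
    List (Int × Int) × PySem.Set (Int × Int) :=
  if u = v then st
  else
    let e := if u < v then (u, v) else (v, u)
    if PySem.Set.contains st.2 e then st
    else (st.1 ++ [e], PySem.Set.add st.2 e)

def pvEdgesOf (graph : PySem.Dict Int (List Int)) : List (Int × Int) :=
  (graph.keys.foldl (fun st u => (graph.getD u []).foldl (pvEdgeStep u) st)
    ([], PySem.Set.empty)).1

-- make_empty_copy / B's dict comprehension {v: set() for v in original} (same iteration; shared)
def pvMakeEmptyCopy (original : PySem.Dict Int (List Int)) : PySem.Dict Int (PySem.Set Int) :=
  original.keys.foldl (fun g v => g.insert v PySem.Set.empty) PySem.Dict.empty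

def pvAddEdge (g : PySem.Dict Int (PySem.Set Int)) (u v : Int) : PySem.Dict Int (PySem.Set Int) :=
  let g := if g.contains u then g else g.insert u PySem.Set.empty
  let g := if g.contains v then g else g.insert v PySem.Set.empty
  let g := g.modify u PySem.Set.empty (fun s => PySem.Set.add s v)
  g.modify v PySem.Set.empty (fun s => PySem.Set.add s u)

-- graph[u].remove(v) is guarded by 'v in graph[u]', so discard under the guard is exact
def pvRemoveEdge (g : PySem.Dict Int (PySem.Set Int)) (u v : Int) : PySem.Dict Int (PySem.Set Int) :=
  let g := if g.contains u && PySem.Set.contains (g.getD u PySem.Set.empty) v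
           then g.modify u PySem.Set.empty (fun s => PySem.Set.discard s v) else g
  if g.contains v && PySem.Set.contains (g.getD v PySem.Set.empty) u
  then g.modify v PySem.Set.empty (fun s => PySem.Set.discard s u) else g

-- the body of A's greedy loop (break modelled by the Bool flag)
def pvStepA (st : PySem.Dict Int (PySem.Set Int) × Bool) (e : Int × Int) :
    PySem.Dict Int (PySem.Set Int) × Bool :=
  if st.2 then st
  else if pvIsMaximalByEuler st.1 then (st.1, true)
  else
    let g := pvAddEdge st.1 e.1 e.2
    if !pvIsPlanarEuler g then (pvRemoveEdge g e.1 e.2, false) else (g, false)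

def maximal_planar_subgraph (original : List (Int × List Int)) : List (Int × List Int) :=
  let orig := PySem.Dict.ofList original
  let planar := pvMakeEmptyCopy orig
  let all_edges := pvSortPairs (pvEdgesOf orig)
  (all_edges.foldl pvStepA (planar, false)).1.items

-- ===== PORT B =====
-- one dict entry's contribution to B's edge comprehension: normalized non-loop pairs
def pvCand (p : Int × List Int) : List (Int × Int) :=
  (p.2.filter (fun v => !(p.1 == v))).map (fun v => if p.1 < v then (p.1, v) else (v, p.1))

-- the body of B's loop; state (graph, n, m, broke) with n, m maintained incrementally
def pvStepB (st : PySem.Dict Int (PySem.Set Int) × Int × Int × Bool) (e : Int × Int) :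
    PySem.Dict Int (PySem.Set Int) × Int × Int × Bool :=
  if st.2.2.2 then st
  else if st.2.1 < 3 ∨ st.2.2.1 = 3 * st.2.1 - 6 then (st.1, st.2.1, st.2.2.1, true)
  else
    let gn := if st.1.contains e.1 then (st.1, st.2.1)
              else (st.1.insert e.1 PySem.Set.empty, st.2.1 + 1)
    let gn := if gn.1.contains e.2 then gn
              else (gn.1.insert e.2 PySem.Set.empty, gn.2 + 1)
    if st.2.2.1 + 1 ≤ 3 * gn.2 - 6 then
      ((gn.1.modify e.1 PySem.Set.empty (fun s => PySem.Set.add s e.2)).modify e.2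
          PySem.Set.empty (fun s => PySem.Set.add s e.1), gn.2, st.2.2.1 + 1, false)
    else (gn.1, gn.2, st.2.2.1, false)

def maximal_planar_subgraph_alt (original : List (Int × List Int)) : List (Int × List Int) :=
  let orig := PySem.Dict.ofList original
  let planar := pvMakeEmptyCopy orig
  let edges := pvSortPairs (PySem.Set.ofList (orig.items.flatMap pvCand))
  ((edges.foldl pvStepB (planar, (planar.size : Int), 0, false)).1).items

-- ===== PRECONDITION & SPEC =====
def Spec_maximal_planar_subgraph (original : List (Int × List Int)) (out : List (Int × List Int)) : Prop := out = maximal_planar_subgraph_alt original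
instance (original : List (Int × List Int)) (out : List (Int × List Int)) : Decidable (Spec_maximal_planar_subgraph original out) := by unfold Spec_maximal_planar_subgraph; infer_instance

-- ===== CLAIM (what is proved, stated in full; the proofs are below) =====
def Claim_equal_maximal_planar_subgraph : Prop := ∀ (original : List (Int × List Int)), Dom_maximal_planar_subgraph original → Spec_maximal_planar_subgraph original (maximal_planar_subgraph original)

-- ===== LEMMAS AND PROOFS =====

-- overwrite-one-key on an items list (what Dict.insert does at a contained key)
def pvOw (l : List (Int × PySem.Set Int)) (k : Int) (a : PySem.Set Int) :
    List (Int × PySem.Set Int) :=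
  l.map (fun p => if p.1 == k then (k, a) else p)

-- total degree of an items list
def pvDeg (l : List (Int × PySem.Set Int)) : Int := (l.map (fun p => (p.2.length : Int))).sum

lemma pvOw_keys (l : List (Int × PySem.Set Int)) (k : Int) (a : PySem.Set Int) :
    (pvOw l k a).map Prod.fst = l.map Prod.fst := by
  simp only [pvOw, List.map_map]
  apply List.map_congr_left
  intro p _
  by_cases h : p.1 = k <;> simp [h]

lemma pvOw_ow_same (l : List (Int × PySem.Set Int)) (k : Int) (a b : PySem.Set Int) :
    pvOw (pvOw l k a) k b = pvOw l k b := by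
  simp only [pvOw, List.map_map]
  apply List.map_congr_left
  intro p _
  by_cases h : p.1 = k <;> simp [h]

lemma pvOw_comm (l : List (Int × PySem.Set Int)) {u v : Int} (huv : u ≠ v)
    (a b : PySem.Set Int) : pvOw (pvOw l u a) v b = pvOw (pvOw l v b) u a := by
  simp only [pvOw, List.map_map]
  apply List.map_congr_left
  intro p _
  by_cases h1 : p.1 = u <;> by_cases h2 : p.1 = v <;>
    simp [h1, h2, huv, Ne.symm huv]

lemma pvOw_id (l : List (Int × PySem.Set Int)) (k : Int) (a : PySem.Set Int)
    (h : ∀ p ∈ l, p.1 = k → p.2 = a) : pvOw l k a = l := by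
  simp only [pvOw]
  have : ∀ p ∈ l, (if p.1 == k then (k, a) else p) = p := by
    intro p hp
    by_cases hk : p.1 = k
    · rw [if_pos (beq_iff_eq.mpr hk), ← hk, ← h p hp hk]
    · rw [if_neg (by simpa using hk)]
  calc l.map _ = l.map id := List.map_congr_left (by simpa using this)
    _ = l := List.map_id l

lemma pvDeg_ow (l : List (Int × PySem.Set Int)) (k : Int) (s a : PySem.Set Int)
    (hnd : (l.map Prod.fst).Nodup) (hmem : (k, s) ∈ l) :
    pvDeg (pvOw l k a) = pvDeg l - (s.length : Int) + (a.length : Int) := by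
  induction l with
  | nil => simp at hmem
  | cons p l ih =>
    simp only [List.map_cons, List.nodup_cons] at hnd
    by_cases hk : p.1 = k
    · have hs : p.2 = s := by
        rcases List.mem_cons.mp hmem with h | h
        · rw [← h]
        · exact absurd (hk ▸ (List.mem_map.mpr ⟨(k, s), h, rfl⟩)) hnd.1
      have hrest : pvOw l k a = l := by
        apply pvOw_id
        intro q hq hqk
        exact absurd (hqk ▸ (List.mem_map.mpr ⟨q, hq, rfl⟩)) (hk ▸ hnd.1)
      simp only [pvOw, List.map_cons]
      rw [if_pos (beq_iff_eq.mpr hk)]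
      simp only [pvOw] at hrest
      rw [hrest]
      simp only [pvDeg, List.map_cons, List.sum_cons, hs]
      ring
    · have hmem' : (k, s) ∈ l := by
        rcases List.mem_cons.mp hmem with h | h
        · exact absurd (by rw [← h]) hk
        · exact h
      have ih' := ih hnd.2 hmem'
      simp only [pvOw, List.map_cons]
      rw [if_neg (by simpa using hk)]
      simp only [pvOw] at ih'
      simp only [pvDeg, List.map_cons, List.sum_cons] at ih' ⊢
      omega

-- the entry a contained key actually holds
lemma pvMem_items_getD (d : PySem.Dict Int (PySem.Set Int)) (k : Int)
    (hc : d.contains k = true) :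
    (k, d.getD k PySem.Set.empty) ∈ d.items := by
  rw [PySem.Dict.contains_eq_isSome_get?] at hc
  rcases Option.isSome_iff_exists.mp hc with ⟨w, hw⟩
  have := PySem.Dict.mem_items_of_get?_eq_some d hw
  rwa [PySem.Dict.getD_eq_get?_getD, hw]

lemma pvKeys_eq_map_fst (d : PySem.Dict Int (PySem.Set Int)) :
    d.keys = d.items.map Prod.fst := rfl

-- edge_count loop = pvDeg
lemma pvEdgeCount_eq (g : PySem.Dict Int (PySem.Set Int)) (h : g.keys.Nodup) :
    g.keys.foldl (fun acc v => acc + ((g.getD v PySem.Set.empty).length : Int)) 0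
      = pvDeg g.items := by
  rw [PySem.List.foldl_add, zero_add, pvDeg,
      PySem.Dict.items_eq_map_keys g h PySem.Set.empty, List.map_map]
  rfl

lemma pvFloordiv_two (m : Int) : PySem.Int.floordiv (2 * m) 2 = m := by
  rw [PySem.Int.floordiv_eq_ediv_of_pos (by norm_num)]
  omega

-- loops stay put once the break flag is set
lemma pvStepA_broken (es : List (Int × Int)) (g : PySem.Dict Int (PySem.Set Int)) :
    es.foldl pvStepA (g, true) = (g, true) := by
  induction es with
  | nil => rfl
  | cons e es ih => simpa [pvStepA] using ih

lemma pvStepB_broken (es : List (Int × Int)) (g : PySem.Dict Int (PySem.Set Int))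
    (n m : Int) : es.foldl pvStepB (g, n, m, true) = (g, n, m, true) := by
  induction es with
  | nil => rfl
  | cons e es ih => simpa [pvStepB] using ih

-- A's Euler tests, rephrased through the invariant deg = 2m
lemma pvIsMaximal_eq (g : PySem.Dict Int (PySem.Set Int)) (m : Int)
    (hnd : g.keys.Nodup) (hd : pvDeg g.items = 2 * m) :
    pvIsMaximalByEuler g
      = decide ((g.size : Int) < 3 ∨ m = 3 * (g.size : Int) - 6) := by
  simp only [pvIsMaximalByEuler, pvEdgeCount_eq g hnd, hd, pvFloordiv_two]
  by_cases h3 : (g.size : Int) < 3 <;> simp [h3]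

lemma pvIsPlanar_eq (g : PySem.Dict Int (PySem.Set Int)) (m : Int)
    (hnd : g.keys.Nodup) (hd : pvDeg g.items = 2 * m)
    (h3 : ¬ (g.size : Int) < 3) :
    pvIsPlanarEuler g = decide (m ≤ 3 * (g.size : Int) - 6) := by
  simp only [pvIsPlanarEuler, pvEdgeCount_eq g hnd, hd, pvFloordiv_two]
  simp [h3]

-- edges_of = set of the normalized non-loop pair stream (B's comprehension)
lemma pvInner_fold (vs : List Int) (u : Int) :
    ∀ (s : PySem.Set (Int × Int)),
    vs.foldl (pvEdgeStep u) (s, s)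
      = (((vs.filter (fun v => !(u == v))).map
            (fun v => if u < v then (u, v) else (v, u))).foldl PySem.Set.add s,
         ((vs.filter (fun v => !(u == v))).map
            (fun v => if u < v then (u, v) else (v, u))).foldl PySem.Set.add s) := by
  induction vs with
  | nil => intro s; rfl
  | cons v vs ih =>
    intro s
    by_cases huv : u = v
    · simpa [pvEdgeStep, huv] using ih s
    · have hstep : pvEdgeStep u (s, s) v
          = (PySem.Set.add s (if u < v then (u, v) else (v, u)),
             PySem.Set.add s (if u < v then (u, v) else (v, u))) := by
        simp only [pvEdgeStep, if_neg huv]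
        by_cases hm : (if u < v then (u, v) else (v, u)) ∈ s <;>
          simp [PySem.Set.add, PySem.Set.contains, hm]
      simp only [List.foldl_cons, hstep, List.filter_cons, huv, List.map_cons]
      simpa [huv] using ih (PySem.Set.add s (if u < v then (u, v) else (v, u)))

lemma pvOuter_fold (l : List (Int × List Int)) :
    ∀ (s : PySem.Set (Int × Int)),
    l.foldl (fun st p => p.2.foldl (pvEdgeStep p.1) st) (s, s)
      = ((l.flatMap pvCand).foldl PySem.Set.add s,
         (l.flatMap pvCand).foldl PySem.Set.add s) := by
  induction l with
  | nil => intro s; rfl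
  | cons p l ih =>
    intro s
    simp only [List.foldl_cons, pvInner_fold p.2 p.1 s, List.flatMap_cons, List.foldl_append]
    exact ih _

lemma pvEdgesOf_eq (d : PySem.Dict Int (List Int)) (h : d.keys.Nodup) :
    pvEdgesOf d = PySem.Set.ofList (d.items.flatMap pvCand) := by
  have hkeys : d.keys.foldl (fun st u => (d.getD u []).foldl (pvEdgeStep u) st)
        ([], PySem.Set.empty)
      = d.items.foldl (fun st p => p.2.foldl (pvEdgeStep p.1) st) ([], PySem.Set.empty) := by
    rw [PySem.Dict.items_eq_map_keys d h ([] : List Int), List.foldl_map]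
  rw [pvEdgesOf, hkeys]
  have := pvOuter_fold d.items ([] : PySem.Set (Int × Int))
  rw [PySem.Set.ofList_eq_foldl]
  simp only [PySem.Set.empty] at *
  rw [this]

-- the empty copy: nodup keys, all values empty
lemma pvCopy_values (ks : List Int) :
    ∀ (g : PySem.Dict Int (PySem.Set Int)),
    (∀ p ∈ g.items, p.2 = ([] : PySem.Set Int)) →
    ∀ p ∈ (ks.foldl (fun g v => g.insert v PySem.Set.empty) g).items,
      p.2 = ([] : PySem.Set Int) := by
  induction ks with
  | nil => intro g hg; exact hg
  | cons k ks ih =>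
    intro g hg
    apply ih
    intro p hp
    rcases (PySem.Dict.mem_items_insert g k PySem.Set.empty p).mp hp with h | h
    · rw [h]; rfl
    · exact hg p h.1

lemma pvGetD_of_all_empty (g : PySem.Dict Int (PySem.Set Int))
    (h : ∀ p ∈ g.items, p.2 = ([] : PySem.Set Int)) (x : Int) :
    g.getD x PySem.Set.empty = [] := by
  rw [PySem.Dict.getD_eq_get?_getD]
  cases hq : g.get? x with
  | none => rfl
  | some w =>
    have := PySem.Dict.mem_items_of_get?_eq_some g hq
    simpa using h (x, w) this

lemma pvDeg_of_all_empty (g : PySem.Dict Int (PySem.Set Int))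
    (h : ∀ p ∈ g.items, p.2 = ([] : PySem.Set Int)) : pvDeg g.items = 0 := by
  apply List.sum_eq_zero
  intro x hx
  rcases List.mem_map.mp hx with ⟨p, hp, rfl⟩
  rw [h p hp]
  rfl

lemma pvCopy_nodup (d : PySem.Dict Int (List Int)) : (pvMakeEmptyCopy d).keys.Nodup :=
  PySem.Dict.nodup_keys_foldl_insert d.keys (fun _ _ => PySem.Set.empty) PySem.Dict.empty
    PySem.Dict.nodup_keys_empty

-- shape of the sorted candidate edges
lemma pvStream_lt (d : PySem.Dict Int (List Int)) :
    ∀ e ∈ d.items.flatMap pvCand, e.1 < e.2 := by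
  intro e he
  rcases List.mem_flatMap.mp he with ⟨p, _, hc⟩
  rcases List.mem_map.mp hc with ⟨v, hv, rfl⟩
  have hne : ¬ p.1 = v := by simpa using (List.mem_filter.mp hv).2
  by_cases hlt : p.1 < v <;> simp [hlt] <;> omega

lemma pvMem_sortPairs (xs : List (Int × Int)) (x : Int × Int) :
    x ∈ pvSortPairs xs ↔ x ∈ xs := by
  simp [pvSortPairs, PySem.List.mem_sorted]

lemma pvNodup_sortPairs (xs : List (Int × Int)) (h : xs.Nodup) :
    (pvSortPairs xs).Nodup := by
  have p1 := PySem.List.sorted_perm xs (fun e : Int × Int => e.2) false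
  have p2 := PySem.List.sorted_perm (PySem.List.sorted xs (fun e : Int × Int => e.2) false)
    (fun e : Int × Int => e.1) false
  exact ((p2.trans p1).nodup_iff).mpr h

-- facts about one setdefault-style step:  g' = (if contains u then g else insert u ∅)
lemma pvSd_facts (g : PySem.Dict Int (PySem.Set Int)) (u : Int) (hnd : g.keys.Nodup) :
    (∀ x, ((if g.contains u then g else g.insert u PySem.Set.empty)).getD x PySem.Set.empty
        = g.getD x PySem.Set.empty)
    ∧ pvDeg ((if g.contains u then g else g.insert u PySem.Set.empty)).items = pvDeg g.items
    ∧ ((if g.contains u then g else g.insert u PySem.Set.empty)).contains u = true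
    ∧ (∀ y, ((if g.contains u then g else g.insert u PySem.Set.empty)).contains y
        = (g.contains y || y == u))
    ∧ (((if g.contains u then g else g.insert u PySem.Set.empty)).size : Int)
        = (g.size : Int) + (if g.contains u then 0 else 1)
    ∧ ((if g.contains u then g else g.insert u PySem.Set.empty)).keys.Nodup := by
  by_cases hc : g.contains u
  · have e1 : (if g.contains u = true then g else g.insert u PySem.Set.empty) = g := by
      simp [hc]
    rw [e1]
    refine ⟨fun x => rfl, rfl, hc, fun y => ?_, by simp [hc], hnd⟩
    by_cases hy : y = u <;> simp [hy, hc]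
  · simp only [hc, if_false, Bool.false_eq_true]
    refine ⟨fun x => ?_, ?_, ?_, fun y => ?_, ?_, ?_⟩
    · rw [PySem.Dict.getD_insert]
      by_cases hx : x = u
      · rw [if_pos hx, hx, PySem.Dict.getD_of_not_contains g PySem.Set.empty (by simpa using hc)]
      · rw [if_neg hx]
    · rw [pvDeg, PySem.Dict.items_insert_of_not_contains g PySem.Set.empty (by simpa using hc)]
      simp [pvDeg, PySem.Set.empty]
    · simp [PySem.Dict.contains_insert]
    · rw [PySem.Dict.contains_insert]
      cases hgy : g.contains y <;> by_cases hy : y = u <;> simp [hy, hgy]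
    · rw [PySem.Dict.size_insert]
      simp [hc]
    · exact PySem.Dict.nodup_keys_insert g u PySem.Set.empty hnd

lemma pvSet_add_of_not_mem {s : PySem.Set Int} {v : Int} (h : v ∉ s) :
    PySem.Set.add s v = s ++ [v] := by
  simp [PySem.Set.add, PySem.Set.contains]
  intro hc
  exact absurd hc h

lemma pvDiscard_append {s : PySem.Set Int} {v : Int} (h : v ∉ s) :
    PySem.Set.discard (s ++ [v]) v = s := by
  simp only [PySem.Set.discard, List.filter_append]
  have h1 : s.filter (fun y => !y == v) = s :=
    List.filter_eq_self.mpr (fun y hy => by simp; exact fun hyv => h (hyv ▸ hy))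
  simp [h1]

-- ===== the main loop simulation =====
lemma pvOw_id_getD (d : PySem.Dict Int (PySem.Set Int)) (hnd : d.keys.Nodup) (k : Int) :
    pvOw d.items k (d.getD k PySem.Set.empty) = d.items := by
  apply pvOw_id
  intro p hp hpk
  have : (k, p.2) ∈ d.items := by
    obtain ⟨p1, p2⟩ := p
    simpa [← hpk] using hp
  exact (PySem.Dict.getD_of_mem_items d this hnd PySem.Set.empty).symm

lemma pvLoop_main (es : List (Int × Int)) :
    ∀ (g : PySem.Dict Int (PySem.Set Int)) (m : Int),
    g.keys.Nodup →
    pvDeg g.items = 2 * m →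
    (∀ e ∈ es, e.1 < e.2) →
    es.Nodup →
    (∀ e ∈ es, e.2 ∉ g.getD e.1 PySem.Set.empty ∧ e.1 ∉ g.getD e.2 PySem.Set.empty) →
    (es.foldl pvStepA (g, false)).1 = (es.foldl pvStepB (g, (g.size : Int), m, false)).1 := by
  induction es with
  | nil => intro g m _ _ _ _ _; rfl
  | cons e es ih =>
    intro g m hnd hdeg hlt hnodup habs
    obtain ⟨u, v⟩ := e
    have huv : u < v := hlt (u, v) List.mem_cons_self
    have hvne : u ≠ v := ne_of_lt huv
    have hmax := pvIsMaximal_eq g m hnd hdeg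
    simp only [List.foldl_cons]
    by_cases hbr : ((g.size : Int) < 3 ∨ m = 3 * (g.size : Int) - 6)
    · have hmt : pvIsMaximalByEuler g = true := by rw [hmax]; exact decide_eq_true hbr
      have hA : pvStepA (g, false) (u, v) = (g, true) := by
        simp [pvStepA, hmt]
      have hB : pvStepB (g, (g.size : Int), m, false) (u, v)
          = (g, (g.size : Int), m, true) := by
        simp only [pvStepB]
        rw [if_neg (by simp), if_pos hbr]
      rw [hA, hB, pvStepA_broken, pvStepB_broken]
    · push_neg at hbr
      have hn3 : ¬ (g.size : Int) < 3 := not_lt.mpr hbr.1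
      have hnor : ¬ ((g.size : Int) < 3 ∨ m = 3 * (g.size : Int) - 6) := by
        rw [not_or]; exact ⟨hn3, hbr.2⟩
      -- the two setdefault steps
      obtain ⟨hgd1, hdg1, hc1u, hcnt1, hs1, hnd1⟩ := pvSd_facts g u hnd
      set ga := (if g.contains u = true then g else g.insert u PySem.Set.empty) with hga
      obtain ⟨hgd2, hdg2, hc2v, hcnt2, hs2, hnd2⟩ := pvSd_facts ga v hnd1
      set g1 := (if ga.contains v = true then ga else ga.insert v PySem.Set.empty) with hg1d
      have hc1u' : g1.contains u = true := by rw [hcnt2, hc1u]; simp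
      have hgd : ∀ x, g1.getD x PySem.Set.empty = g.getD x PySem.Set.empty := by
        intro x; rw [hgd2, hgd1]
      have hdgg : pvDeg g1.items = 2 * m := by rw [hdg2, hdg1, hdeg]
      set su := g1.getD u PySem.Set.empty with hsu
      set sv := g1.getD v PySem.Set.empty with hsv
      have habs_u : v ∉ su := by rw [hsu, hgd]; exact (habs (u, v) List.mem_cons_self).1
      have habs_v : u ∉ sv := by rw [hsv, hgd]; exact (habs (u, v) List.mem_cons_self).2
      have haddu : PySem.Set.add su v = su ++ [v] := pvSet_add_of_not_mem habs_u
      have haddv : PySem.Set.add sv u = sv ++ [u] := pvSet_add_of_not_mem habs_v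
      set g1' := g1.modify u PySem.Set.empty (fun s => PySem.Set.add s v) with hg1'
      set g2 := g1'.modify v PySem.Set.empty (fun s => PySem.Set.add s u) with hg2
      have hnd1k : (g1.items.map Prod.fst).Nodup := by
        rw [← pvKeys_eq_map_fst g1]; exact hnd2
      -- items of g1' and g2 as overwrites
      have hitems1 : g1'.items = pvOw g1.items u (PySem.Set.add su v) := by
        rw [hg1', PySem.Dict.modify, PySem.Dict.items_insert_of_contains g1 _ hc1u']
        rfl
      have hkeys1 : g1'.keys = g1.keys := by
        rw [pvKeys_eq_map_fst, pvKeys_eq_map_fst, hitems1, pvOw_keys]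
      have hnd1' : g1'.keys.Nodup := by rw [hkeys1]; exact hnd2
      have hc1'v : g1'.contains v = true := by
        rw [hg1', PySem.Dict.contains_modify]; simp [hc2v]
      have hgd1' : ∀ x, g1'.getD x PySem.Set.empty
          = if x = u then PySem.Set.add su v else g1.getD x PySem.Set.empty := by
        intro x; rw [hg1', PySem.Dict.getD_modify]
      have hg1'v : g1'.getD v PySem.Set.empty = sv := by
        rw [hgd1', if_neg (Ne.symm hvne)]
      have hitems2 : g2.items = pvOw g1'.items v (PySem.Set.add sv u) := by
        rw [hg2, PySem.Dict.modify, hg1'v, PySem.Dict.items_insert_of_contains g1' _ hc1'v]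
        rfl
      have hkeys2 : g2.keys = g1.keys := by
        rw [pvKeys_eq_map_fst g2, hitems2, pvOw_keys, ← pvKeys_eq_map_fst g1', hkeys1,
          pvKeys_eq_map_fst g1]
      have hnd2' : g2.keys.Nodup := by rw [hkeys2]; exact hnd2
      have hsize2 : (g2.size : Int) = (g1.size : Int) := by
        have : g2.items.length = g1.items.length := by
          have h1 := congrArg List.length hkeys2
          simpa [pvKeys_eq_map_fst] using h1
        simp [PySem.Dict.size, this]
      -- degree bookkeeping
      have hmemu : (u, su) ∈ g1.items := pvMem_items_getD g1 u hc1u'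
      have hdeg1' : pvDeg g1'.items = pvDeg g1.items + 1 := by
        rw [hitems1, pvDeg_ow g1.items u su _ hnd1k hmemu, haddu]
        simp
        ring
      have hmemv : (v, sv) ∈ g1'.items := by
        have := pvMem_items_getD g1' v hc1'v
        rwa [hg1'v] at this
      have hdeg2' : pvDeg g2.items = 2 * (m + 1) := by
        rw [hitems2, pvDeg_ow g1'.items v sv _ (by rw [← pvKeys_eq_map_fst g1', hkeys1]; exact hnd2) hmemv,
          haddv, hdeg1', hdgg]
        simp
        ring
      -- the added-vertex count matches B's n
      have hsizes : (g.size : Int) + ((if g.contains u = true then 0 else 1)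
          + (if ga.contains v = true then 0 else 1)) = (g1.size : Int) := by
        rw [hs2, hs1]; ring
      have hsz3 : ¬ (g1.size : Int) < 3 := by
        have h1 : (g.size : Int) ≤ (g1.size : Int) := by
          rw [← hsizes]; split_ifs <;> omega
        omega
      -- A's step reduces to the add/check/remove on g1
      have hmf : pvIsMaximalByEuler g = false := by
        rw [hmax]; exact decide_eq_false hnor
      have hadd : pvAddEdge g u v = g2 := by
        simp only [pvAddEdge]
        rw [← hga, ← hg1d, ← hg1', ← hg2]
      have hA1 : pvStepA (g, false) (u, v)
          = (if !pvIsPlanarEuler g2 then (pvRemoveEdge g2 u v, false) else (g2, false)) := by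
        simp only [pvStepA, hmf]
        rw [if_neg (by simp), if_neg (by simp), hadd]
      have hplan : pvIsPlanarEuler g2 = decide (m + 1 ≤ 3 * (g1.size : Int) - 6) := by
        rw [pvIsPlanar_eq g2 (m + 1) hnd2' hdeg2' (by rw [hsize2]; exact hsz3), hsize2]
      -- B's step
      have hB1 : pvStepB (g, (g.size : Int), m, false) (u, v)
          = (if m + 1 ≤ 3 * (g1.size : Int) - 6 then (g2, (g1.size : Int), m + 1, false)
             else (g1, (g1.size : Int), m, false)) := by
        simp only [pvStepB]
        rw [if_neg (by simp), if_neg hnor]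
        by_cases hcu : g.contains u = true
        · have e1 : ga = g := by rw [hga, if_pos hcu]
          by_cases hcv : ga.contains v = true
          · have e2 : g1 = g := by rw [hg1d, if_pos hcv, e1]
            have e3 : (g.size : Int) = (g1.size : Int) := by
              rw [← hsizes]; simp [hcu, hcv]; try omega
            rw [e1] at hcv
            simp only [hcu, if_true, hcv]
            rw [e3, ← e2, ← hg1', ← hg2]
          · have e2 : g1 = g.insert v PySem.Set.empty := by rw [hg1d, if_neg hcv, e1]
            have e3 : (g.size : Int) + 1 = (g1.size : Int) := by
              rw [← hsizes]; simp [hcu, hcv]; try omega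
            rw [e1] at hcv
            have hcv' : g.contains v = false := by simpa using hcv
            simp only [hcu, if_true, hcv', Bool.false_eq_true, if_false]
            rw [e3, ← e2, ← hg1', ← hg2]
        · have e1 : ga = g.insert u PySem.Set.empty := by rw [hga, if_neg hcu]
          have hcu' : g.contains u = false := by simpa using hcu
          by_cases hcv : ga.contains v = true
          · have e2 : g1 = g.insert u PySem.Set.empty := by rw [hg1d, if_pos hcv, e1]
            have e3 : (g.size : Int) + 1 = (g1.size : Int) := by
              rw [← hsizes]; simp [hcu, hcv]; try omega
            rw [e1] at hcv
            simp only [hcu', Bool.false_eq_true, if_false, hcv, if_true]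
            rw [e3, ← e2, ← hg1', ← hg2]
          · have e2 : g1 = (g.insert u PySem.Set.empty).insert v PySem.Set.empty := by
              rw [hg1d, if_neg hcv, e1]
            have e3 : (g.size : Int) + 1 + 1 = (g1.size : Int) := by
              rw [← hsizes]; simp [hcu, hcv]; try omega
            rw [e1] at hcv
            have hcv' : (g.insert u PySem.Set.empty).contains v = false := by simpa using hcv
            simp only [hcu', hcv', Bool.false_eq_true, if_false]
            rw [e3, ← e2, ← hg1', ← hg2]
      rw [hA1, hB1, hplan]
      by_cases hacc : m + 1 ≤ 3 * (g1.size : Int) - 6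
      · -- edge accepted on both sides
        rw [if_pos hacc, if_neg (by simp [hacc])]
        rw [← hsize2]
        apply ih g2 (m + 1) hnd2' hdeg2' (fun e he => hlt e (List.mem_cons_of_mem _ he))
          (hnodup.of_cons)
        intro e he
        have hne : e ≠ (u, v) := by
          rintro rfl; exact (List.nodup_cons.mp hnodup).1 he
        obtain ⟨a, b⟩ := e
        have hab : a < b := hlt (a, b) (List.mem_cons_of_mem _ he)
        have h0 := habs (a, b) (List.mem_cons_of_mem _ he)
        have hgd2' : ∀ x, g2.getD x PySem.Set.empty
            = if x = v then PySem.Set.add sv u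
              else if x = u then PySem.Set.add su v else g1.getD x PySem.Set.empty := by
          intro x
          rw [hg2, PySem.Dict.getD_modify]
          by_cases hx : x = v
          · rw [if_pos hx, if_pos hx, hg1'v]
          · rw [if_neg hx, if_neg hx, hgd1']
        constructor
        · rw [hgd2']
          by_cases hav : a = v
          · rw [if_pos hav, haddv, hsv, hgd]
            simp only [List.mem_append, List.mem_singleton]
            rintro (hb | rfl)
            · exact h0.1 (by rw [hav]; exact hb)
            · omega
          · rw [if_neg hav]
            by_cases hau : a = u
            · rw [if_pos hau, haddu, hsu, hgd]
              simp only [List.mem_append, List.mem_singleton]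
              rintro (hb | rfl)
              · exact h0.1 (by rw [hau]; exact hb)
              · exact hne (by rw [hau])
            · rw [if_neg hau, hgd]; exact h0.1
        · rw [hgd2']
          by_cases hbv : b = v
          · rw [if_pos hbv, haddv, hsv, hgd]
            simp only [List.mem_append, List.mem_singleton]
            rintro (ha | rfl)
            · exact h0.2 (by rw [hbv]; exact ha)
            · exact hne (by rw [hbv])
          · rw [if_neg hbv]
            by_cases hbu : b = u
            · rw [if_pos hbu, haddu, hsu, hgd]
              simp only [List.mem_append, List.mem_singleton]
              rintro (ha | rfl)
              · exact h0.2 (by rw [hbu]; exact ha)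
              · omega
            · rw [if_neg hbu, hgd]; exact h0.2
      · -- edge rejected: A removes it again, B never added it
        rw [if_neg hacc, if_pos (by simp [hacc])]
        have hrem : pvRemoveEdge g2 u v = g1 := by
          have hc2u : g2.contains u = true := by
            rw [hg2, PySem.Dict.contains_modify, hg1', PySem.Dict.contains_modify]
            simp [hc1u']
          have hgd2u : g2.getD u PySem.Set.empty = su ++ [v] := by
            rw [hg2, PySem.Dict.getD_modify, if_neg hvne, hgd1', if_pos rfl, haddu]
          have hcontv : PySem.Set.contains (su ++ [v]) v = true := by
            simp [PySem.Set.contains]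
          set g3 := g2.modify u PySem.Set.empty (fun s => PySem.Set.discard s v) with hg3
          have hcond1 : (g2.contains u && PySem.Set.contains (g2.getD u PySem.Set.empty) v)
              = true := by
            rw [hc2u, hgd2u, hcontv]
            simp
          have hc3v : g3.contains v = true := by
            rw [hg3, PySem.Dict.contains_modify, hg2, PySem.Dict.contains_modify]
            simp
          have hgd3v : g3.getD v PySem.Set.empty = sv ++ [u] := by
            rw [hg3, PySem.Dict.getD_modify, if_neg (Ne.symm hvne), hg2,
              PySem.Dict.getD_modify, if_pos rfl, hg1'v, haddv]
          have hitems3 : g3.items = pvOw g2.items u su := by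
            rw [hg3, PySem.Dict.modify, hgd2u, pvDiscard_append habs_u,
              PySem.Dict.items_insert_of_contains g2 _ hc2u]
            rfl
          have hcond2 : (g3.contains v && PySem.Set.contains (g3.getD v PySem.Set.empty) u)
              = true := by
            rw [hc3v, hgd3v]
            simp [PySem.Set.contains]
          simp only [pvRemoveEdge]
          rw [if_pos hcond1, ← hg3, if_pos hcond2]
          apply PySem.Dict.ext
          rw [PySem.Dict.modify, hgd3v, pvDiscard_append habs_v,
            PySem.Dict.items_insert_of_contains g3 _ hc3v]
          show pvOw g3.items v sv = g1.items
          rw [hitems3, hitems2, hitems1, haddu, haddv]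
          rw [pvOw_comm _ (Ne.symm hvne), pvOw_ow_same, pvOw_ow_same, hsu, pvOw_id_getD g1 hnd2 u,
            hsv, pvOw_id_getD g1 hnd2 v]
        rw [hrem]
        apply ih g1 m hnd2 hdgg (fun e he => hlt e (List.mem_cons_of_mem _ he))
          (hnodup.of_cons)
        intro e he
        rw [hgd, hgd]
        exact habs e (List.mem_cons_of_mem _ he)

-- ===== VERDICT (by name: the statement is the Claim_ definition above) =====
theorem maximal_planar_subgraph_spec : Claim_equal_maximal_planar_subgraph := by
  intro original _
  unfold Spec_maximal_planar_subgraph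
  show maximal_planar_subgraph original = maximal_planar_subgraph_alt original
  rw [maximal_planar_subgraph, maximal_planar_subgraph_alt]
  have hknd : (PySem.Dict.ofList original).keys.Nodup := PySem.Dict.nodup_keys_ofList original
  rw [pvEdgesOf_eq _ hknd]
  set orig := PySem.Dict.ofList original
  set planar := pvMakeEmptyCopy orig with hplanar
  set E := pvSortPairs (PySem.Set.ofList (orig.items.flatMap pvCand)) with hE
  have hvals : ∀ p ∈ planar.items, p.2 = ([] : PySem.Set Int) := by
    apply pvCopy_values
    intro p hq
    simp [PySem.Dict.empty] at hq
  have hlt : ∀ e ∈ E, e.1 < e.2 := by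
    intro e he
    have := (pvMem_sortPairs _ e).mp he
    rw [PySem.Set.mem_ofList] at this
    exact pvStream_lt orig e this
  have hnodupE : E.Nodup := pvNodup_sortPairs _ (PySem.Set.nodup_ofList _)
  have habs : ∀ e ∈ E, e.2 ∉ planar.getD e.1 PySem.Set.empty
      ∧ e.1 ∉ planar.getD e.2 PySem.Set.empty := by
    intro e _
    rw [pvGetD_of_all_empty planar hvals, pvGetD_of_all_empty planar hvals]
    simp
  have := pvLoop_main E planar 0 (pvCopy_nodup orig)
    (by rw [pvDeg_of_all_empty planar hvals]; ring) hlt hnodupE habs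
  exact congrArg PySem.Dict.items this
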